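-- pv_equiv track=rewrite | github.com/prithika-sathish/Sales-Lead-Automation | intelligence/lead_engine.py | _persona_from_signals
-- ===== SOURCE A (Python) =====
-- from typing import Any
--
-- def _persona_from_signals(signals: list[dict[str, Any]], fallback: str) -> str:
--     signal_types = {str(sig.get("signal_type") or "") for sig in signals}
--     if signal_types.intersection({"infra_scaling", "dev_activity"}):
--         return "CTO / Engineering Lead"
--     if signal_types.intersection({"hiring", "hiring_spike", "sales_expansion", "growth_phase"}):
--         return "VP Sales / RevOps"
--     if signal_types.intersection({"product_launch", "integration_added", "product_gap", "feature_update"}):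
--         return "Product Manager / Head of Product"
--     if signal_types.intersection({"customer_pain", "company_update"}):
--         return "COO / Operations Lead"
--     return fallback
-- ===== SOURCE B (Python) =====
-- _PERSONA_BY_SIGNAL = {
--     "infra_scaling": (0, "CTO / Engineering Lead"),
--     "dev_activity": (0, "CTO / Engineering Lead"),
--     "hiring": (1, "VP Sales / RevOps"),
--     "hiring_spike": (1, "VP Sales / RevOps"),
--     "sales_expansion": (1, "VP Sales / RevOps"),
--     "growth_phase": (1, "VP Sales / RevOps"),
--     "product_launch": (2, "Product Manager / Head of Product"),
--     "integration_added": (2, "Product Manager / Head of Product"),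
--     "product_gap": (2, "Product Manager / Head of Product"),
--     "feature_update": (2, "Product Manager / Head of Product"),
--     "customer_pain": (3, "COO / Operations Lead"),
--     "company_update": (3, "COO / Operations Lead"),
-- }
--
-- def _persona_from_signals(signals, fallback):
--     best = None
--     for sig in signals:
--         entry = _PERSONA_BY_SIGNAL.get(str(sig.get("signal_type") or ""))
--         if entry is not None and (best is None or entry[0] < best[0]):
--             best = entry
--     return best[1] if best is not None else fallback
-- ===== Notes on version B (the rewrite author's own statement) =====
-- stated objective: idiomatic
-- what changed: Replaces the four ordered set-intersection checks by a data-driven table mapping each signal type to a (priority rank, persona) pair, with one pass over the signals keeping the minimum rank.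
import Mathlib
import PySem

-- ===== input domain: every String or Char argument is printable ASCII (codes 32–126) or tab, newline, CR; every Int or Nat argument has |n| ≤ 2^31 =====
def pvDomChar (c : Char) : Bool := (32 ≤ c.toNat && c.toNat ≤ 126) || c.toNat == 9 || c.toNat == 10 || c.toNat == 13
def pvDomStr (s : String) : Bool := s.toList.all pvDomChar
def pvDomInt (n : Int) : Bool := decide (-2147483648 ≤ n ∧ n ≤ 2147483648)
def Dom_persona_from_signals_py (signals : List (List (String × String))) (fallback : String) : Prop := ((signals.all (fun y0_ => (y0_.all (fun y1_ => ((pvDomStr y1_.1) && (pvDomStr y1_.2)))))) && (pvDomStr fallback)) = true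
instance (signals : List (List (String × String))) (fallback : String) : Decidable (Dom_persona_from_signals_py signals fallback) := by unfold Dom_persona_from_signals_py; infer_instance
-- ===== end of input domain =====

-- B replaces A's four ordered set-intersection checks by a signal→(rank, persona) table and a
-- single pass keeping the minimum rank (idiomatic, data-driven; same O(n) cost).

-- ===== PORT A =====
-- str(sig.get("signal_type") or ""): dict lookup (first match), `or` maps falsy "" / missing to "";
-- str() is the identity on the String values admitted by the type convention.
def pvNorm (sig : List (String × String)) : String :=
  match (PySem.Dict.mk sig).get? "signal_type" with
  | none => ""
  | some s => if s == "" then "" else s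

def persona_from_signals_py (signals : List (List (String × String))) (fallback : String) : String :=
  let signal_types : PySem.Set String := PySem.Set.ofList (signals.map pvNorm)
  if PySem.Set.inter signal_types (PySem.Set.ofList ["infra_scaling", "dev_activity"]) ≠ [] then
    "CTO / Engineering Lead"
  else if PySem.Set.inter signal_types (PySem.Set.ofList ["hiring", "hiring_spike", "sales_expansion", "growth_phase"]) ≠ [] then
    "VP Sales / RevOps"
  else if PySem.Set.inter signal_types (PySem.Set.ofList ["product_launch", "integration_added", "product_gap", "feature_update"]) ≠ [] then
    "Product Manager / Head of Product"
  else if PySem.Set.inter signal_types (PySem.Set.ofList ["customer_pain", "company_update"]) ≠ [] then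
    "COO / Operations Lead"
  else fallback

-- ===== PORT B =====
def pvTable : PySem.Dict String (Nat × String) := PySem.Dict.mk
  [ ("infra_scaling", (0, "CTO / Engineering Lead"))
  , ("dev_activity", (0, "CTO / Engineering Lead"))
  , ("hiring", (1, "VP Sales / RevOps"))
  , ("hiring_spike", (1, "VP Sales / RevOps"))
  , ("sales_expansion", (1, "VP Sales / RevOps"))
  , ("growth_phase", (1, "VP Sales / RevOps"))
  , ("product_launch", (2, "Product Manager / Head of Product"))
  , ("integration_added", (2, "Product Manager / Head of Product"))
  , ("product_gap", (2, "Product Manager / Head of Product"))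
  , ("feature_update", (2, "Product Manager / Head of Product"))
  , ("customer_pain", (3, "COO / Operations Lead"))
  , ("company_update", (3, "COO / Operations Lead")) ]

def pvStep (best : Option (Nat × String)) (sig : List (String × String)) : Option (Nat × String) :=
  match pvTable.get? (pvNorm sig) with
  | none => best
  | some e =>
    match best with
    | none => some e
    | some b => if e.1 < b.1 then some e else some b

def persona_from_signals_py_alt (signals : List (List (String × String))) (fallback : String) : String :=
  match signals.foldl pvStep none with
  | some b => b.2
  | none => fallback

-- ===== PRECONDITION & SPEC =====
def Spec_persona_from_signals_py (signals : List (List (String × String))) (fallback : String) (out : String) : Prop := out = persona_from_signals_py_alt signals fallback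
instance (signals : List (List (String × String))) (fallback : String) (out : String) : Decidable (Spec_persona_from_signals_py signals fallback out) := by unfold Spec_persona_from_signals_py; infer_instance

-- ===== CLAIM (what is proved, stated in full; the proofs are below) =====
def Claim_equal_persona_from_signals_py : Prop := ∀ (signals : List (List (String × String))) (fallback : String), Dom_persona_from_signals_py signals fallback → Spec_persona_from_signals_py signals fallback (persona_from_signals_py signals fallback)

-- ===== LEMMAS AND PROOFS =====

-- group membership as Bool over the normalized keys
def pvG : Nat → List String
  | 0 => ["infra_scaling", "dev_activity"]
  | 1 => ["hiring", "hiring_spike", "sales_expansion", "growth_phase"]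
  | 2 => ["product_launch", "integration_added", "product_gap", "feature_update"]
  | _ => ["customer_pain", "company_update"]

def pvP : Nat → String
  | 0 => "CTO / Engineering Lead"
  | 1 => "VP Sales / RevOps"
  | 2 => "Product Manager / Head of Product"
  | _ => "COO / Operations Lead"

def pvRk (s : String) : Option Nat :=
  if s ∈ pvG 0 then some 0
  else if s ∈ pvG 1 then some 1
  else if s ∈ pvG 2 then some 2
  else if s ∈ pvG 3 then some 3
  else none

def pvOmin : Option Nat → Option Nat → Option Nat
  | none, b => b
  | a, none => a
  | some a, some b => some (min a b)

def pvM : List String → Option Nat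
  | [] => none
  | k :: ks => pvOmin (pvRk k) (pvM ks)

def pvAi (ks : List String) (i : Nat) : Bool := ks.any (fun s => decide (s ∈ pvG i))

lemma pvTable_get (s : String) : pvTable.get? s = (pvRk s).map (fun r => (r, pvP r)) := by
  by_cases h1 : s = "infra_scaling"
  · subst h1; decide
  by_cases h2 : s = "dev_activity"
  · subst h2; decide
  by_cases h3 : s = "hiring"
  · subst h3; decide
  by_cases h4 : s = "hiring_spike"
  · subst h4; decide
  by_cases h5 : s = "sales_expansion"
  · subst h5; decide
  by_cases h6 : s = "growth_phase"
  · subst h6; decide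
  by_cases h7 : s = "product_launch"
  · subst h7; decide
  by_cases h8 : s = "integration_added"
  · subst h8; decide
  by_cases h9 : s = "product_gap"
  · subst h9; decide
  by_cases h10 : s = "feature_update"
  · subst h10; decide
  by_cases h11 : s = "customer_pain"
  · subst h11; decide
  by_cases h12 : s = "company_update"
  · subst h12; decide
  have n1 : ("infra_scaling" = s) = False := eq_false (fun h => h1 h.symm)
  have n2 : ("dev_activity" = s) = False := eq_false (fun h => h2 h.symm)
  have n3 : ("hiring" = s) = False := eq_false (fun h => h3 h.symm)
  have n4 : ("hiring_spike" = s) = False := eq_false (fun h => h4 h.symm)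
  have n5 : ("sales_expansion" = s) = False := eq_false (fun h => h5 h.symm)
  have n6 : ("growth_phase" = s) = False := eq_false (fun h => h6 h.symm)
  have n7 : ("product_launch" = s) = False := eq_false (fun h => h7 h.symm)
  have n8 : ("integration_added" = s) = False := eq_false (fun h => h8 h.symm)
  have n9 : ("product_gap" = s) = False := eq_false (fun h => h9 h.symm)
  have n10 : ("feature_update" = s) = False := eq_false (fun h => h10 h.symm)
  have n11 : ("customer_pain" = s) = False := eq_false (fun h => h11 h.symm)
  have n12 : ("company_update" = s) = False := eq_false (fun h => h12 h.symm)
  simp [pvTable, PySem.Dict.get?, PySem.Dict.get?_mk_cons, pvRk, pvG, h1, h2, h3, h4, h5, h6, h7, h8, h9, h10, h11, h12, n1, n2, n3, n4, n5, n6, n7, n8, n9, n10, n11, n12]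

lemma pvOmin_assoc (a b c : Option Nat) : pvOmin (pvOmin a b) c = pvOmin a (pvOmin b c) := by
  cases a <;> cases b <;> cases c <;> simp [pvOmin, Nat.min_assoc]

lemma pvStep_eq (b : Option Nat) (sig : List (String × String)) :
    pvStep (b.map (fun r => (r, pvP r))) sig
      = (pvOmin b (pvRk (pvNorm sig))).map (fun r => (r, pvP r)) := by
  simp only [pvStep, pvTable_get]
  cases h : pvRk (pvNorm sig) with
  | none => cases b <;> simp [pvOmin]
  | some r =>
    cases b with
    | none => simp [pvOmin]
    | some rb =>
      simp only [Option.map_some, pvOmin]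
      split_ifs with hlt
      · simp [Nat.min_eq_right (Nat.le_of_lt hlt)]
      · simp [Nat.min_eq_left (Nat.le_of_not_lt hlt)]

lemma pvFold_char (signals : List (List (String × String))) (b : Option Nat) :
    signals.foldl pvStep (b.map (fun r => (r, pvP r)))
      = (pvOmin b (pvM (signals.map pvNorm))).map (fun r => (r, pvP r)) := by
  induction signals generalizing b with
  | nil => cases b <;> simp [pvM, pvOmin]
  | cons sig rest ih =>
    simp only [List.foldl_cons, pvStep_eq, ih, List.map_cons, pvM, pvOmin_assoc]

lemma pvInter_ne_nil (ks : List String) (i : Nat) :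
    (PySem.Set.inter (PySem.Set.ofList ks) (PySem.Set.ofList (pvG i)) ≠ []) ↔ pvAi ks i = true := by
  rw [Ne, List.eq_nil_iff_forall_not_mem]
  push_neg
  simp [pvAi, List.any_eq_true, PySem.Set.mem_inter, PySem.Set.mem_ofList]

lemma pvInter_nil (ks : List String) (i : Nat) :
    (PySem.Set.inter (PySem.Set.ofList ks) (PySem.Set.ofList (pvG i)) = []) ↔ pvAi ks i = false := by
  rw [← Bool.not_eq_true, ← pvInter_ne_nil ks i]
  exact not_not.symm

lemma pvM_eq_chain (ks : List String) :
    pvM ks = if pvAi ks 0 then some 0 else if pvAi ks 1 then some 1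
      else if pvAi ks 2 then some 2 else if pvAi ks 3 then some 3 else none := by
  induction ks with
  | nil => simp [pvM, pvAi]
  | cons k ks ih =>
    have hcons : ∀ i, pvAi (k :: ks) i = (decide (k ∈ pvG i) || pvAi ks i) := by
      intro i; simp [pvAi]
    simp only [pvM, ih, hcons]
    by_cases h0 : k ∈ pvG 0 <;> by_cases h1 : k ∈ pvG 1 <;>
      by_cases h2 : k ∈ pvG 2 <;> by_cases h3 : k ∈ pvG 3 <;>
      simp only [pvRk, h0, h1, h2, h3, if_false, decide_true, decide_false,
        Bool.true_or, Bool.false_or, if_pos] <;>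
      by_cases b0 : pvAi ks 0 <;> by_cases b1 : pvAi ks 1 <;>
      by_cases b2 : pvAi ks 2 <;> by_cases b3 : pvAi ks 3 <;>
      simp_all [pvOmin]

-- ===== VERDICT (by name: the statement is the Claim_ definition above) =====
theorem persona_from_signals_py_spec : Claim_equal_persona_from_signals_py := by
  intro signals fallback _
  unfold Spec_persona_from_signals_py persona_from_signals_py persona_from_signals_py_alt
  have hB := pvFold_char signals none
  simp only [Option.map_none, pvOmin] at hB
  rw [hB, pvM_eq_chain]
  have c0 : ∀ ks : List String, (PySem.Set.inter (PySem.Set.ofList ks) (PySem.Set.ofList ["infra_scaling", "dev_activity"]) = []) ↔ pvAi ks 0 = false := fun ks => pvInter_nil ks 0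
  have c1 : ∀ ks : List String, (PySem.Set.inter (PySem.Set.ofList ks) (PySem.Set.ofList ["hiring", "hiring_spike", "sales_expansion", "growth_phase"]) = []) ↔ pvAi ks 1 = false := fun ks => pvInter_nil ks 1
  have c2 : ∀ ks : List String, (PySem.Set.inter (PySem.Set.ofList ks) (PySem.Set.ofList ["product_launch", "integration_added", "product_gap", "feature_update"]) = []) ↔ pvAi ks 2 = false := fun ks => pvInter_nil ks 2
  have c3 : ∀ ks : List String, (PySem.Set.inter (PySem.Set.ofList ks) (PySem.Set.ofList ["customer_pain", "company_update"]) = []) ↔ pvAi ks 3 = false := fun ks => pvInter_nil ks 3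
  by_cases a0 : pvAi (signals.map pvNorm) 0 <;>
  by_cases a1 : pvAi (signals.map pvNorm) 1 <;>
  by_cases a2 : pvAi (signals.map pvNorm) 2 <;>
  by_cases a3 : pvAi (signals.map pvNorm) 3 <;>
    simp [c0, c1, c2, c3, a0, a1, a2, a3, pvP]
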